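-- pv_equiv track=rewrite | github.com/xskerty/IGI_STRWEB_BSUIR | IGI/LR3/Lab3/string_handler.py | count_lowercase_consonant_words
-- ===== SOURCE A (Python) =====
-- def split_text(text):
--     words = []
--     current_word = ""
--     for char in text:
--         if char == " " or char == ",":
--             if current_word:
--                 words.append(current_word)
--                 current_word = ""
--         else:
--             current_word += char
--     if current_word:
--         words.append(current_word)
--     return words
--
-- def count_lowercase_consonant_words(text):
--     vowels = "aeiou"
--     consonant_count = 0
--     words = split_text(text)
--
--     for word in words:
--         if word:
--             first_letter = word[0]
--             if 'a' <= first_letter <= 'z' and first_letter not in vowels: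
--                 consonant_count += 1
--
--     return consonant_count
-- ===== SOURCE B (Python) =====
-- def count_lowercase_consonant_words(text):
--     count = 0
--     prev_delim = True
--     for c in text:
--         if c == " " or c == ",":
--             prev_delim = True
--         else:
--             if prev_delim and 'a' <= c <= 'z' and c not in "aeiou":
--                 count += 1
--             prev_delim = False
--     return count
-- ===== Notes on version B (the rewrite author's own statement) =====
-- stated objective: faster
-- what changed: B makes a single pass over the characters tracking a word-start flag, instead of building the full word list and scanning it again; no intermediate strings or list are allocated.
import Mathlib
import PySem

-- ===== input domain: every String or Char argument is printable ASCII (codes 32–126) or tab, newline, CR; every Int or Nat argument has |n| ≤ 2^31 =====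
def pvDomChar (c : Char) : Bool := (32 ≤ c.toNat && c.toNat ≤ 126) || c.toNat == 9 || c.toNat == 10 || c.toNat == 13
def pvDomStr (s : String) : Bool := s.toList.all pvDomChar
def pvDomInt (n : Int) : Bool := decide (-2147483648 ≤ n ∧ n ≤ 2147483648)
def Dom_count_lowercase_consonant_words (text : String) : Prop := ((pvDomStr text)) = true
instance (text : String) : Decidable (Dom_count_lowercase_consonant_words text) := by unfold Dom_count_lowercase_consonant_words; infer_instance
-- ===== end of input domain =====

-- B replaces A's split-into-a-word-list-then-scan with a single pass over the characters
-- tracking a word-start flag (same result, no intermediate list).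

-- ===== PORT A =====
-- loop body of split_text: words/current_word state; delimiters are ' ' and ','
def pvSplitStep (st : List (List Char) × List Char) (c : Char) : List (List Char) × List Char :=
  if c = ' ' ∨ c = ',' then
    if st.2 ≠ [] then (st.1 ++ [st.2], []) else st
  else (st.1, st.2 ++ [c])

def split_text (text : String) : List (List Char) :=
  let st := text.toList.foldl pvSplitStep ([], [])
  if st.2 ≠ [] then st.1 ++ [st.2] else st.1

-- loop body of A's counting loop; word[0] via pyGet? (the none branch is unreachable:
-- it is guarded by `if word:` exactly as in the Python)
def pvCountStep (n : Int) (w : List Char) : Int :=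
  if w ≠ [] then
    match PySem.List.pyGet? w 0 with
    | some f => if ('a' ≤ f ∧ f ≤ 'z') ∧ f ∉ "aeiou".toList then n + 1 else n
    | none => n
  else n

def count_lowercase_consonant_words (text : String) : Int :=
  (split_text text).foldl pvCountStep 0

-- ===== PORT B =====
def pvIsCons (c : Char) : Bool :=
  decide (('a' ≤ c ∧ c ≤ 'z') ∧ c ∉ "aeiou".toList)

-- B's loop body: state = (count, prev_delim)
def pvBStep (st : Int × Bool) (c : Char) : Int × Bool :=
  if c = ' ' ∨ c = ',' then (st.1, true)
  else (if st.2 && pvIsCons c then st.1 + 1 else st.1, false)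

def count_lowercase_consonant_words_alt (text : String) : Int :=
  (text.toList.foldl pvBStep (0, true)).1

-- ===== PRECONDITION & SPEC =====
def Spec_count_lowercase_consonant_words (text : String) (out : Int) : Prop := out = count_lowercase_consonant_words_alt text
instance (text : String) (out : Int) : Decidable (Spec_count_lowercase_consonant_words text out) := by unfold Spec_count_lowercase_consonant_words; infer_instance

-- ===== CLAIM (what is proved, stated in full; the proofs are below) =====
def Claim_equal_count_lowercase_consonant_words : Prop := ∀ (text : String), Dom_count_lowercase_consonant_words text → Spec_count_lowercase_consonant_words text (count_lowercase_consonant_words text)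

-- ===== LEMMAS AND PROOFS =====

-- score of one word: 1 iff it starts with a lowercase consonant
def pvScore (w : List Char) : Int :=
  match w with
  | [] => 0
  | c :: _ => if pvIsCons c then 1 else 0

theorem pvCountStep_eq (n : Int) (w : List Char) : pvCountStep n w = n + pvScore w := by
  cases w with
  | nil => simp [pvCountStep, pvScore]
  | cons c t =>
      by_cases h : ('a' ≤ c ∧ c ≤ 'z') ∧ c ∉ "aeiou".toList <;>
        simp [pvCountStep, pvScore, PySem.List.pyGet?, PySem.List.pyIdx?, pvIsCons, h] <;>
        split_ifs <;> omega

theorem count_eq_sum (ws : List (List Char)) (n : Int) :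
    ws.foldl pvCountStep n = n + (ws.map pvScore).sum := by
  induction ws generalizing n with
  | nil => simp
  | cons w ws ih => simp [List.foldl, ih, pvCountStep_eq, add_assoc]

theorem pvScore_append_singleton (cur : List Char) (c : Char) (h : cur ≠ []) :
    pvScore (cur ++ [c]) = pvScore cur := by
  cases cur with
  | nil => exact absurd rfl h
  | cons a t => simp [pvScore]

-- the loop invariant: B's running count equals the score-sum of the words A has
-- emitted so far plus the score of the pending current word
theorem pvKey (cs : List Char) (ws : List (List Char)) (cur : List Char) (n : Int)
    (h : n = (ws.map pvScore).sum + pvScore cur) :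
    (cs.foldl pvBStep (n, cur.isEmpty)).1 =
      ((if (cs.foldl pvSplitStep (ws, cur)).2 ≠ []
          then (cs.foldl pvSplitStep (ws, cur)).1 ++ [(cs.foldl pvSplitStep (ws, cur)).2]
          else (cs.foldl pvSplitStep (ws, cur)).1).map pvScore).sum := by
  induction cs generalizing ws cur n with
  | nil =>
      by_cases hc : cur = []
      · subst hc; simp [h, pvScore]
      · simp [hc, h]
  | cons c cs ih =>
      by_cases hd : c = ' ' ∨ c = ','
      · by_cases hc : cur = []
        · subst hc
          simp only [List.foldl, pvBStep, pvSplitStep, hd, if_pos, List.isEmpty_nil, ne_eq,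
            not_true_eq_false, if_false]
          exact ih ws [] n (by simpa [pvScore] using h)
        · simp only [List.foldl, pvBStep, pvSplitStep, hd, if_pos, hc, ne_eq,
            not_false_eq_true]
          have := ih (ws ++ [cur]) [] n (by simp [h, pvScore])
          simpa using this
      · by_cases hc : cur = []
        · subst hc
          simp only [List.foldl, pvBStep, pvSplitStep, hd, List.isEmpty_nil,
            Bool.true_and, List.nil_append]
          have hne : ([c] : List Char).isEmpty = false := by simp
          by_cases hcons : pvIsCons c
          · have := ih ws [c] (n + 1) (by simp [h, pvScore, hcons])
            simpa [hne, hcons] using this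
          · have := ih ws [c] n (by simp [h, pvScore, hcons])
            simpa [hne, hcons] using this
        · simp only [List.foldl, pvBStep, pvSplitStep, hd]
          have hie : cur.isEmpty = false := by simpa using hc
          have hne : (cur ++ [c]).isEmpty = false := by simp [hc]
          have := ih ws (cur ++ [c]) n (by rw [h, pvScore_append_singleton cur c hc])
          simpa [hie, hne] using this

-- ===== VERDICT (by name: the statement is the Claim_ definition above) =====
theorem count_lowercase_consonant_words_spec : Claim_equal_count_lowercase_consonant_words := by
  intro text _
  show count_lowercase_consonant_words text = count_lowercase_consonant_words_alt text
  have hk := pvKey text.toList [] [] 0 (by simp [pvScore])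
  simp only [List.isEmpty_nil] at hk
  simp [count_lowercase_consonant_words, count_lowercase_consonant_words_alt, split_text,
    count_eq_sum, hk]
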